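-- pv_equiv track=rewrite | github.com/dplocki/podcast-downloader | podcast_downloader/downloaded.py | get_last_downloaded_file_before_gap
-- ===== SOURCE A (Python) =====
-- from typing import Callable, Iterable, List
--
-- def get_last_downloaded_file_before_gap(
--     feed_files: List[str], downloaded_files: Iterable[str]
-- ) -> str:
--     last_file = None
--     all_downloaded_files = set(downloaded_files)
--
--     for feed_file_name in feed_files:
--         if feed_file_name in all_downloaded_files:
--             last_file = feed_file_name
--         else:
--             if last_file != None:
--                 return last_file
--
--     return last_file
-- ===== SOURCE B (Python) =====
-- def get_last_downloaded_file_before_gap(feed_files, downloaded_files):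
--     s = set(downloaded_files)
--     hits = [i for i, f in enumerate(feed_files) if f in s]
--     if not hits:
--         return None
--     k = 0
--     while k + 1 < len(hits) and hits[k + 1] == hits[k] + 1:
--         k += 1
--     return feed_files[hits[k]]
-- ===== Notes on version B (the rewrite author's own statement) =====
-- stated objective: alternative
-- what changed: B first collects the positions of all downloaded feed files as an index list, then arithmetically walks that list to the end of the first block of consecutive indices and indexes back into feed_files, instead of A's single scan with a running last_file accumulator and early return at the first gap.
import Mathlib
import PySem

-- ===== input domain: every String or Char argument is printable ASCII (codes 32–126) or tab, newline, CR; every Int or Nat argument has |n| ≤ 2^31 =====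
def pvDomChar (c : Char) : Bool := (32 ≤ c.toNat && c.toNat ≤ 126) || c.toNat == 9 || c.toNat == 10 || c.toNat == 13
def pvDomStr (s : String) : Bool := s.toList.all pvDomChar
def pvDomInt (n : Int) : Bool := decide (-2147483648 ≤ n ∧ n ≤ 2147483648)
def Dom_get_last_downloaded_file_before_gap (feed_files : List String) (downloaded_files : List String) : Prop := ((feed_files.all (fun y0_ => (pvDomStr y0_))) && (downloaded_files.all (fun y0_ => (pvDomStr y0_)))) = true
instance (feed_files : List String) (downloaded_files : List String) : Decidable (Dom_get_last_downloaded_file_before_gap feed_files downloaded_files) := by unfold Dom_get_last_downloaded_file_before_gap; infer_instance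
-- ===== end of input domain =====

-- B collects the indices of downloaded feed files once, walks to the end of the first block of
-- consecutive indices, and indexes back into feed_files (objective: alternative decomposition).


-- ===== PORT A =====
-- the for-loop with the running `last_file` and the early return at the first gap
def pvLoopA (s : PySem.Set String) : List String → Option String → Option String
  | [], last => last
  | f :: rest, last =>
      if PySem.Set.contains s f then
        pvLoopA s rest (some f)
      else
        match last with
        | some l => some l
        | none => pvLoopA s rest none

def get_last_downloaded_file_before_gap (feed_files : List String) (downloaded_files : List String) : Option String :=
  pvLoopA (PySem.Set.ofList downloaded_files) feed_files none

-- ===== PORT B =====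
-- the `while k + 1 < len(hits) and hits[k+1] == hits[k] + 1` loop, structurally on the hits list
def pvWalkB : Int → List Int → Int
  | h, [] => h
  | h, h2 :: t => if h2 = h + 1 then pvWalkB h2 t else h

def get_last_downloaded_file_before_gap_alt (feed_files : List String) (downloaded_files : List String) : Option String :=
  let s := PySem.Set.ofList downloaded_files
  let hits := ((PySem.List.enumerate feed_files 0).filter (fun p => PySem.Set.contains s p.2)).map Prod.fst
  match hits with
  | [] => none
  | h :: t => PySem.List.pyGet? feed_files (pvWalkB h t)

-- ===== PRECONDITION & SPEC =====
def Spec_get_last_downloaded_file_before_gap (feed_files : List String) (downloaded_files : List String) (out : Option String) : Prop := out = get_last_downloaded_file_before_gap_alt feed_files downloaded_files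
instance (feed_files : List String) (downloaded_files : List String) (out : Option String) : Decidable (Spec_get_last_downloaded_file_before_gap feed_files downloaded_files out) := by unfold Spec_get_last_downloaded_file_before_gap; infer_instance

-- ===== CLAIM (what is proved, stated in full; the proofs are below) =====
def Claim_equal_get_last_downloaded_file_before_gap : Prop := ∀ (feed_files : List String) (downloaded_files : List String), Dom_get_last_downloaded_file_before_gap feed_files downloaded_files → Spec_get_last_downloaded_file_before_gap feed_files downloaded_files (get_last_downloaded_file_before_gap feed_files downloaded_files)

-- ===== LEMMAS AND PROOFS =====

-- hit-index list of `xs` when enumeration starts at `st`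
def pvHits (s : PySem.Set String) (xs : List String) (st : Int) : List Int :=
  ((PySem.List.enumerate xs st).filter (fun p => PySem.Set.contains s p.2)).map Prod.fst

theorem pvHits_nil (s : PySem.Set String) (st : Int) : pvHits s [] st = [] := rfl

theorem pvHits_cons (s : PySem.Set String) (f : String) (rest : List String) (st : Int) :
    pvHits s (f :: rest) st =
      if PySem.Set.contains s f then st :: pvHits s rest (st + 1) else pvHits s rest (st + 1) := by
  simp [pvHits, PySem.List.enumerate_cons, List.filter_cons]
  split_ifs <;> simp

-- every hit index is at least the start index
theorem pvHits_ge (s : PySem.Set String) (xs : List String) (st h : Int)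
    (hm : h ∈ pvHits s xs st) : st ≤ h := by
  induction xs generalizing st with
  | nil => simp [pvHits_nil] at hm
  | cons f rest ih =>
      rw [pvHits_cons] at hm
      split_ifs at hm with hc
      · rcases List.mem_cons.mp hm with rfl | hm
        · exact le_refl _
        · linarith [ih (st + 1) hm]
      · linarith [ih (st + 1) hm]

-- the walk stays inside {st} ∪ l
theorem pvWalkB_mem (l : List Int) (st : Int) : pvWalkB st l = st ∨ pvWalkB st l ∈ l := by
  induction l generalizing st with
  | nil => left; rfl
  | cons h2 t ih =>
      by_cases h : h2 = st + 1
      · rw [pvWalkB, if_pos h]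
        rcases ih h2 with h' | h'
        · right; rw [h']; exact List.mem_cons_self ..
        · right; exact List.mem_cons_of_mem _ h'
      · left; rw [pvWalkB, if_neg h]

-- A A-side once last_file is set: keep taking while members, return the last taken
theorem pvLoopA_some (s : PySem.Set String) (xs : List String) (l : String) :
    pvLoopA s xs (some l) = some ((xs.takeWhile (fun f => PySem.Set.contains s f)).getLastD l) := by
  induction xs generalizing l with
  | nil => simp [pvLoopA]
  | cons f rest ih =>
      by_cases h : f ∈ s
      · simp [pvLoopA, h, ih, List.getLast?_cons, List.getLastD_eq_getLast?]
      · simp [pvLoopA, h]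

-- A-side while last_file is None: the loop skips the leading run of non-members
theorem pvLoopA_none (s : PySem.Set String) (xs : List String) :
    pvLoopA s xs none =
      ((xs.dropWhile (fun f => !(PySem.Set.contains s f))).takeWhile (fun f => PySem.Set.contains s f)).getLast? := by
  induction xs with
  | nil => simp [pvLoopA]
  | cons f rest ih =>
      by_cases h : f ∈ s
      · simp [pvLoopA, h, pvLoopA_some, List.getLast?_cons, List.getLastD_eq_getLast?]
      · simp [pvLoopA, h, ih]

-- B-side walk from st over the hits of the tail: it advances exactly along the member run
theorem pvWalkB_hits (s : PySem.Set String) (xs : List String) (st : Int) :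
    pvWalkB st (pvHits s xs (st + 1)) =
      st + (xs.takeWhile (fun f => PySem.Set.contains s f)).length := by
  induction xs generalizing st with
  | nil => simp [pvHits_nil, pvWalkB]
  | cons f rest ih =>
      rw [pvHits_cons]
      by_cases h : f ∈ s
      · have hc : PySem.Set.contains s f = true := by simp [h]
        rw [if_pos hc, pvWalkB, if_pos rfl, ih (st + 1), List.takeWhile_cons, if_pos hc]
        simp
        ring
      · have hc : PySem.Set.contains s f = false := by simp [h]
        rw [if_neg (by simp [h])]
        have hstop : pvWalkB st (pvHits s rest (st + 1 + 1)) = st := by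
          cases hh : pvHits s rest (st + 1 + 1) with
          | nil => rfl
          | cons h2 t =>
              have hne : h2 ≠ st + 1 := by
                have := pvHits_ge s rest (st + 1 + 1) h2 (by rw [hh]; exact List.mem_cons_self ..)
                omega
              rw [pvWalkB, if_neg hne]
        rw [hstop, List.takeWhile_cons, if_neg (by simp [h])]
        simp

-- pyGet? on a cons at a positive index steps to the tail
theorem pyGet?_cons_pos (f : String) (rest : List String) (i : Int) (hi : 1 ≤ i) :
    PySem.List.pyGet? (f :: rest) i = PySem.List.pyGet? rest (i - 1) := by
  obtain ⟨m, rfl⟩ : ∃ m : Nat, i = ((m : Int) + 1) := ⟨(i - 1).toNat, by omega⟩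
  have h1 : (m : Int) + 1 - 1 = ((m : Int)) := by ring
  have h2 : (m : Int) + 1 = (((m + 1 : Nat) : Int)) := by push_cast; ring
  rw [h1, h2, PySem.List.pyGet?_natCast, PySem.List.pyGet?_natCast]
  simp

-- indexing the full list at the length of the takeWhile run hits the run's last element
theorem pyGet?_takeWhile_last (p : String → Bool) (f : String) (rest : List String) :
    PySem.List.pyGet? (f :: rest) ((rest.takeWhile p).length : Int) =
      (f :: rest.takeWhile p).getLast? := by
  set t := rest.takeWhile p with ht
  rw [PySem.List.pyGet?_natCast]
  have hpre : (f :: t) <+: (f :: rest) := List.cons_prefix_cons.mpr ⟨rfl, List.takeWhile_prefix p⟩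
  obtain ⟨u, hu⟩ := hpre
  have h1 : (f :: rest)[t.length]? = (f :: t)[t.length]? := by
    rw [← hu, List.getElem?_append_left (by simp)]
  rw [h1, List.getLast?_eq_getElem?]
  simp

-- proof-side view of B's match, with the enumeration start generalized to st
def pvPick (xs : List String) (st : Int) : List Int → Option String
  | [] => none
  | h :: t => PySem.List.pyGet? xs (pvWalkB h t - st)

-- main B-side characterization: the hits walk computes the first-run last element
theorem pvAltCore (s : PySem.Set String) (xs : List String) (st : Int) (hst : 0 ≤ st) :
    pvPick xs st (pvHits s xs st) =
      ((xs.dropWhile (fun f => !(PySem.Set.contains s f))).takeWhile (fun f => PySem.Set.contains s f)).getLast? := by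
  induction xs generalizing st with
  | nil => simp [pvHits_nil, pvPick]
  | cons f rest ih =>
      rw [pvHits_cons]
      by_cases h : f ∈ s
      · have hc : PySem.Set.contains s f = true := by simp [h]
        rw [if_pos hc, pvPick]
        rw [pvWalkB_hits s rest st]
        have harith : st + ((rest.takeWhile (fun f => PySem.Set.contains s f)).length : Int) - st =
            ((rest.takeWhile (fun f => PySem.Set.contains s f)).length : Int) := by ring
        rw [harith, pyGet?_takeWhile_last (fun f => PySem.Set.contains s f) f rest]
        rw [show List.dropWhile (fun f => !(PySem.Set.contains s f)) (f :: rest) = f :: rest from by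
              rw [List.dropWhile_cons]; simp [h]]
        rw [List.takeWhile_cons, if_pos hc]
      · have hc : PySem.Set.contains s f = false := by simp [h]
        rw [if_neg (by simp [h])]
        have ihr := ih (st + 1) (by omega)
        rw [show List.dropWhile (fun f => !(PySem.Set.contains s f)) (f :: rest) =
              List.dropWhile (fun f => !(PySem.Set.contains s f)) rest from by
            rw [List.dropWhile_cons]; simp [h]]
        rw [← ihr]
        cases hh : pvHits s rest (st + 1) with
        | nil => rfl
        | cons h2 t =>
            rw [pvPick, pvPick]
            have hget : st + 1 ≤ pvWalkB h2 t := by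
              have hge2 : st + 1 ≤ h2 := pvHits_ge s rest (st + 1) h2 (by rw [hh]; exact List.mem_cons_self ..)
              rcases pvWalkB_mem t h2 with h' | h'
              · omega
              · have := pvHits_ge s rest (st + 1) (pvWalkB h2 t) (by rw [hh]; exact List.mem_cons_of_mem _ h')
                omega
            rw [pyGet?_cons_pos f rest _ (by omega)]
            have harith : pvWalkB h2 t - st - 1 = pvWalkB h2 t - (st + 1) := by ring
            rw [harith]

-- ===== VERDICT (by name: the statement is the Claim_ definition above) =====
theorem get_last_downloaded_file_before_gap_spec : Claim_equal_get_last_downloaded_file_before_gap := by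
  intro feed_files downloaded_files _
  unfold Spec_get_last_downloaded_file_before_gap get_last_downloaded_file_before_gap
    get_last_downloaded_file_before_gap_alt
  rw [pvLoopA_none]
  have hmain := pvAltCore (PySem.Set.ofList downloaded_files) feed_files 0 (le_refl 0)
  rw [← hmain]
  show pvPick feed_files 0 (pvHits (PySem.Set.ofList downloaded_files) feed_files 0) =
    (match pvHits (PySem.Set.ofList downloaded_files) feed_files 0 with
     | [] => none
     | h :: t => PySem.List.pyGet? feed_files (pvWalkB h t))
  generalize pvHits (PySem.Set.ofList downloaded_files) feed_files 0 = L
  cases L with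
  | nil => rfl
  | cons h t => rw [pvPick]; simp
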